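-- pv_equiv track=rewrite | github.com/angelomartinezc/hacker_rank | python/interview_problems/lifting_weights.py | weightCapacity
-- ===== SOURCE A (Python) =====
-- def weightCapacity(weights, maxCapacity):
--     # create set with all combinations
--     comb = set([0])
--     # loop weights list
--     for w in weights:
--         # create a set to save comb
--         temp = set()
--         # loop comb set
--         for c in comb:
--             if w + c == maxCapacity:
--                 return maxCapacity
--             elif w + c < maxCapacity:
--                 temp.add(w + c)
--         comb.update(temp)
--     return max(comb)
-- ===== SOURCE B (Python) =====
-- def _merge(xs, ys):
--     # merge two sorted duplicate-free lists into one (dropping cross duplicates)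
--     out = []
--     i = j = 0
--     while i < len(xs) and j < len(ys):
--         if xs[i] < ys[j]:
--             out.append(xs[i]); i += 1
--         elif ys[j] < xs[i]:
--             out.append(ys[j]); j += 1
--         else:
--             out.append(xs[i]); i += 1; j += 1
--     out.extend(xs[i:])
--     out.extend(ys[j:])
--     return out
--
-- def weightCapacity(weights, maxCapacity):
--     sums = [0]                       # sorted, duplicate-free list of reachable sums
--     for w in weights:
--         shifted = []
--         for c in sums:               # ascending, so we can stop past the capacity
--             s = c + w
--             if s == maxCapacity:
--                 return maxCapacity
--             if s > maxCapacity: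
--                 break
--             shifted.append(s)
--         sums = _merge(sums, shifted)
--     return sums[-1]
-- ===== Notes on version B (the rewrite author's own statement) =====
-- stated objective: alternative
-- what changed: Replaces A's hash-set of reachable sums (inner set scan, set.update, final max()) with a sorted duplicate-free list: the per-weight scan stops early once a shifted sum passes the capacity, new sums are combined by a two-pointer sorted merge, and the answer is the last element instead of a max scan.
import Mathlib
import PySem

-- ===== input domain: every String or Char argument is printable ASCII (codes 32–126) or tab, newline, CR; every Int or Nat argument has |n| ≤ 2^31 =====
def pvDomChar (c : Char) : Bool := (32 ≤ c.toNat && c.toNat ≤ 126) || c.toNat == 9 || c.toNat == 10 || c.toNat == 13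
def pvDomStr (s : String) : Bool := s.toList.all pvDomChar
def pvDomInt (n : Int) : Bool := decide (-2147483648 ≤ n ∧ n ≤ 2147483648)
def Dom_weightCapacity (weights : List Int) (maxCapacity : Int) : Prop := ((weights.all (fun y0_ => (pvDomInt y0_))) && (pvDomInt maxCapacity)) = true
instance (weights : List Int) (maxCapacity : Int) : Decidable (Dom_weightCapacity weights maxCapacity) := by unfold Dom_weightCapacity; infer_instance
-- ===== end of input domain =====

-- B replaces A's hash-set of reachable sums with a sorted duplicate-free list: early break once a
-- shifted sum passes the capacity, two-pointer sorted merge, last element instead of max() — objective: alternative.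


-- ===== PORT A =====
-- inner loop 'for c in comb: …'; 'none' = the early 'return maxCapacity'.
-- (Python's set iteration order is arbitrary; here the returned VALUE is order-independent,
-- since the early return always returns maxCapacity itself, so iterating the Set's list is exact.)
def pvInnerA (C w : Int) : List Int → PySem.Set Int → Option (PySem.Set Int)
  | [], temp => some temp
  | c :: cs, temp =>
    if w + c = C then none
    else if w + c < C then pvInnerA C w cs (PySem.Set.add temp (w + c))
    else pvInnerA C w cs temp

-- outer loop 'for w in weights', then 'return max(comb)'
def pvOuterA (C : Int) : List Int → PySem.Set Int → Int
  | [], comb => ((PySem.List.max? comb (fun x => x)).getD 0)   -- comb always contains 0, so getD's default is never used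
  | w :: ws, comb =>
    match pvInnerA C w comb PySem.Set.empty with
    | none => C
    | some temp => pvOuterA C ws (PySem.Set.update comb temp)

def weightCapacity (weights : List Int) (maxCapacity : Int) : Int :=
  pvOuterA maxCapacity weights (PySem.Set.ofList [0])

-- ===== PORT B =====
-- _merge: the two-pointer merge of two sorted duplicate-free lists
def pvMerge : List Int → List Int → List Int
  | [], ys => ys
  | x :: xs, [] => x :: xs
  | x :: xs, y :: ys =>
    if x < y then x :: pvMerge xs (y :: ys)
    else if y < x then y :: pvMerge (x :: xs) ys
    else x :: pvMerge xs ys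
termination_by xs ys => xs.length + ys.length

-- the inner 'for c in sums' of B: 'none' = the early 'return maxCapacity', 'some l' = the shifted list
-- (the 's > maxCapacity: break' case contributes nothing further)
def pvScanB (C w : Int) : List Int → Option (List Int)
  | [] => some []
  | c :: cs =>
    if c + w = C then none
    else if c + w > C then some []
    else (pvScanB C w cs).map (fun l => (c + w) :: l)

-- the outer 'for w in weights' of B, then 'return sums[-1]'
def pvLoopB (C : Int) : List Int → List Int → Int
  | [], sums => (PySem.List.pyGet? sums (-1)).getD 0   -- sums[-1]; sums always contains 0, so getD's default is never used
  | w :: ws, sums =>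
    match pvScanB C w sums with
    | none => C
    | some shifted => pvLoopB C ws (pvMerge sums shifted)

def weightCapacity_alt (weights : List Int) (maxCapacity : Int) : Int :=
  pvLoopB maxCapacity weights [0]

-- ===== PRECONDITION & SPEC =====
def Spec_weightCapacity (weights : List Int) (maxCapacity : Int) (out : Int) : Prop := out = weightCapacity_alt weights maxCapacity
instance (weights : List Int) (maxCapacity : Int) (out : Int) : Decidable (Spec_weightCapacity weights maxCapacity out) := by unfold Spec_weightCapacity; infer_instance

-- ===== CLAIM (what is proved, stated in full; the proofs are below) =====
def Claim_equal_weightCapacity : Prop := ∀ (weights : List Int) (maxCapacity : Int), Dom_weightCapacity weights maxCapacity → Spec_weightCapacity weights maxCapacity (weightCapacity weights maxCapacity)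

-- ===== LEMMAS AND PROOFS =====

-- pvInnerA returns none iff some scanned element hits the capacity
lemma pv_innerA_none (C w : Int) (cs : List Int) (acc : PySem.Set Int) :
    pvInnerA C w cs acc = none ↔ ∃ c ∈ cs, w + c = C := by
  induction cs generalizing acc with
  | nil => simp [pvInnerA]
  | cons c rest ih =>
    by_cases h1 : w + c = C
    · simp [pvInnerA, h1]
    · by_cases h2 : w + c < C <;> simp [pvInnerA, h1, h2, ih]

-- membership in the temp set pvInnerA builds
lemma pv_innerA_some (C w : Int) (cs : List Int) (acc temp : PySem.Set Int)
    (h : pvInnerA C w cs acc = some temp) (x : Int) :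
    x ∈ temp ↔ x ∈ acc ∨ ∃ c ∈ cs, w + c = x ∧ x < C := by
  induction cs generalizing acc with
  | nil => simp_all [pvInnerA]
  | cons c rest ih =>
    by_cases h1 : w + c = C
    · simp [pvInnerA, h1] at h
    · by_cases h2 : w + c < C
      · rw [pvInnerA] at h
        simp only [h1, if_false, h2, if_true] at h
        rw [ih _ h]
        constructor
        · rintro (hx | hx)
          · rcases (PySem.Set.mem_add acc (w + c) x).mp hx with hx | hx
            · exact Or.inl hx
            · exact Or.inr ⟨c, by simp, hx.symm, hx ▸ h2⟩
          · obtain ⟨c', hc', hcx, hxC⟩ := hx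
            exact Or.inr ⟨c', by simp [hc'], hcx, hxC⟩
        · rintro (hx | ⟨c', hc', hcx, hxC⟩)
          · exact Or.inl ((PySem.Set.mem_add acc (w + c) x).mpr (Or.inl hx))
          · rcases List.mem_cons.mp hc' with hceq | hc'
            · subst hceq
              exact Or.inl ((PySem.Set.mem_add acc (w + c') x).mpr (Or.inr hcx.symm))
            · exact Or.inr ⟨c', hc', hcx, hxC⟩
      · rw [pvInnerA] at h
        simp only [h1, if_false, h2, if_false] at h
        rw [ih _ h]
        constructor
        · rintro (hx | ⟨c', hc', hcx, hxC⟩)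
          · exact Or.inl hx
          · exact Or.inr ⟨c', by simp [hc'], hcx, hxC⟩
        · rintro (hx | ⟨c', hc', hcx, hxC⟩)
          · exact Or.inl hx
          · rcases List.mem_cons.mp hc' with hceq | hc'
            · subst hceq; omega
            · exact Or.inr ⟨c', hc', hcx, hxC⟩

-- membership in a two-pointer merge
lemma pv_mem_merge (xs ys : List Int) (x : Int) : x ∈ pvMerge xs ys ↔ x ∈ xs ∨ x ∈ ys := by
  fun_induction pvMerge xs ys with
  | case1 ys => simp
  | case2 x' xs => simp
  | case3 x' xs y ys h ih => simp [ih]; tauto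
  | case4 x' xs y ys h1 h2 ih => simp [ih]; tauto
  | case5 x' xs y ys h1 h2 ih =>
    have : x' = y := by omega
    subst this
    simp [ih]; tauto

-- merging two sorted duplicate-free lists is sorted (and duplicate-free)
lemma pv_sorted_merge (xs ys : List Int) (hx : xs.Pairwise (· < ·)) (hy : ys.Pairwise (· < ·)) :
    (pvMerge xs ys).Pairwise (· < ·) := by
  fun_induction pvMerge xs ys with
  | case1 ys => exact hy
  | case2 x' xs => exact hx
  | case3 x' xs y ys h ih =>
    rw [List.pairwise_cons] at hx ⊢
    refine ⟨?_, ih hx.2 hy⟩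
    intro z hz
    rcases (pv_mem_merge _ _ _).mp hz with hz | hz
    · exact hx.1 z hz
    · rcases List.mem_cons.mp hz with rfl | hz
      · exact h
      · rw [List.pairwise_cons] at hy
        exact lt_trans h (hy.1 z hz)
  | case4 x' xs y ys h1 h2 ih =>
    rw [List.pairwise_cons] at hy ⊢
    refine ⟨?_, ih hx hy.2⟩
    intro z hz
    rcases (pv_mem_merge _ _ _).mp hz with hz | hz
    · rcases List.mem_cons.mp hz with rfl | hz
      · exact h2
      · rw [List.pairwise_cons] at hx
        exact lt_trans h2 (hx.1 z hz)
    · exact hy.1 z hz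
  | case5 x' xs y ys h1 h2 ih =>
    have hxy : x' = y := by omega
    subst hxy
    rw [List.pairwise_cons] at hx hy ⊢
    refine ⟨?_, ih hx.2 hy.2⟩
    intro z hz
    rcases (pv_mem_merge _ _ _).mp hz with hz | hz
    · exact hx.1 z hz
    · exact hy.1 z hz

-- on a sorted list, B's scan early-returns exactly when some element hits the capacity
lemma pv_scanB_none (C w : Int) (cs : List Int) (hs : cs.Pairwise (· < ·)) :
    pvScanB C w cs = none ↔ ∃ c ∈ cs, c + w = C := by
  induction cs with
  | nil => simp [pvScanB]
  | cons c rest ih =>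
    rw [List.pairwise_cons] at hs
    by_cases h1 : c + w = C
    · simp [pvScanB, h1]
    · by_cases h2 : c + w > C
      · rw [pvScanB]
        simp only [h1, if_false, h2, if_true]
        constructor
        · intro h; cases h
        · rintro ⟨c', hc', hcC⟩
          rcases List.mem_cons.mp hc' with rfl | hc'
          · omega
          · have := hs.1 c' hc'
            omega
      · rw [pvScanB]
        simp only [h1, if_false, h2, if_false]
        rw [Option.map_eq_none_iff, ih hs.2]
        constructor
        · rintro ⟨c', hc', hcC⟩; exact ⟨c', by simp [hc'], hcC⟩
        · rintro ⟨c', hc', hcC⟩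
          rcases List.mem_cons.mp hc' with rfl | hc'
          · omega
          · exact ⟨c', hc', hcC⟩

-- the shifted list B's scan builds: its members, and its sortedness
lemma pv_scanB_some (C w : Int) (cs : List Int) (hs : cs.Pairwise (· < ·)) (l : List Int)
    (h : pvScanB C w cs = some l) :
    (∀ x : Int, x ∈ l ↔ ∃ c ∈ cs, c + w = x ∧ x < C) ∧ l.Pairwise (· < ·) := by
  induction cs generalizing l with
  | nil =>
    rw [pvScanB] at h
    injection h with h
    subst h
    simp
  | cons c rest ih =>
    rw [List.pairwise_cons] at hs
    by_cases h1 : c + w = C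
    · simp [pvScanB, h1] at h
    · by_cases h2 : c + w > C
      · rw [pvScanB] at h
        simp only [h1, if_false, h2, if_true] at h
        injection h with h
        subst h
        constructor
        · intro x
          simp only [List.not_mem_nil, false_iff]
          rintro ⟨c', hc', hcx, hxC⟩
          rcases List.mem_cons.mp hc' with rfl | hc'
          · omega
          · have := hs.1 c' hc'
            omega
        · simp
      · rw [pvScanB] at h
        simp only [h1, if_false, h2, if_false] at h
        rw [Option.map_eq_some_iff] at h
        obtain ⟨l', hl', rfl⟩ := h
        obtain ⟨ihm, ihs⟩ := ih hs.2 l' hl'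
        constructor
        · intro x
          rw [List.mem_cons, ihm]
          constructor
          · rintro (rfl | ⟨c', hc', hcx, hxC⟩)
            · exact ⟨c, by simp, rfl, by omega⟩
            · exact ⟨c', by simp [hc'], hcx, hxC⟩
          · rintro ⟨c', hc', hcx, hxC⟩
            rcases List.mem_cons.mp hc' with rfl | hc'
            · exact Or.inl hcx.symm
            · exact Or.inr ⟨c', hc', hcx, hxC⟩
        · rw [List.pairwise_cons]
          refine ⟨?_, ihs⟩
          intro z hz
          obtain ⟨c', hc', hcz, _⟩ := (ihm z).mp hz
          have := hs.1 c' hc'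
          omega

-- sums[-1] of a nonempty list is its last element
lemma pv_get_neg_one (xs : List Int) (h : xs ≠ []) :
    PySem.List.pyGet? xs (-1) = xs.getLast? := by
  have hn : 1 ≤ xs.length := List.length_pos_of_ne_nil h
  simp only [PySem.List.pyGet?, PySem.List.pyIdx?, List.getLast?_eq_getElem?]
  have h0 : ¬ (0 : Int) ≤ -1 := by omega
  have h1 : -(xs.length : Int) ≤ -1 := by omega
  simp [h1]

-- the last element of a sorted list bounds every member
lemma pv_sorted_le_last (xs : List Int) (hs : xs.Pairwise (· < ·)) (L : Int)
    (hL : xs.getLast? = some L) : ∀ y ∈ xs, y ≤ L := by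
  induction xs with
  | nil => simp
  | cons x xs ih =>
    rw [List.pairwise_cons] at hs
    intro y hy
    cases xs with
    | nil =>
      simp at hL hy
      omega
    | cons b bs =>
      rw [List.getLast?_cons_cons] at hL
      have hLmem : L ∈ b :: bs := List.mem_of_getLast? hL
      rcases List.mem_cons.mp hy with rfl | hy
      · exact le_of_lt (hs.1 L hLmem)
      · exact ih hs.2 hL y hy

-- the synchronised invariant: A's comb and B's sorted sums hold the same reachable sums
lemma pv_main (C : Int) (ws : List Int) (comb : PySem.Set Int) (sums : List Int)
    (h0 : (0:Int) ∈ comb)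
    (hmem : ∀ x : Int, x ∈ sums ↔ x ∈ comb)
    (hsort : sums.Pairwise (· < ·)) :
    pvOuterA C ws comb = pvLoopB C ws sums := by
  induction ws generalizing comb sums with
  | nil =>
    rw [pvOuterA, pvLoopB]
    have hne : sums ≠ [] := by
      intro hnil
      rw [hnil] at hmem
      exact (by simpa using (hmem 0).mpr h0)
    cases hmax : PySem.List.max? comb (fun x => x) with
    | none =>
      exact absurd ((PySem.List.max?_eq_none_iff _ _).mp hmax ▸ h0) (List.not_mem_nil)
    | some m =>
      have hm := PySem.List.max?_mem hmax
      have hmx := PySem.List.max?_isMax hmax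
      rw [pv_get_neg_one sums hne]
      cases hL : sums.getLast? with
      | none => exact absurd (List.getLast?_eq_none_iff.mp hL) hne
      | some L =>
      have hLmem : L ∈ comb := (hmem L).mp (List.mem_of_getLast? hL)
      have hmL : m ≤ L := pv_sorted_le_last sums hsort L hL m ((hmem m).mpr hm)
      have hLm : L ≤ m := hmx L hLmem
      simp only [Option.getD_some]
      omega
  | cons w ws ih =>
    by_cases hex : ∃ c ∈ comb, w + c = C
    · have hA : pvInnerA C w comb PySem.Set.empty = none := (pv_innerA_none C w comb _).mpr hex
      have hB : pvScanB C w sums = none := by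
        rw [pv_scanB_none C w sums hsort]
        obtain ⟨c, hc, hcC⟩ := hex
        exact ⟨c, (hmem c).mpr hc, by omega⟩
      simp only [pvOuterA, pvLoopB, hA, hB]
    · cases hA : pvInnerA C w comb PySem.Set.empty with
      | none => exact absurd ((pv_innerA_none C w comb _).mp hA) hex
      | some temp =>
        cases hB : pvScanB C w sums with
        | none =>
          obtain ⟨c, hc, hcC⟩ := (pv_scanB_none C w sums hsort).mp hB
          exact absurd ⟨c, (hmem c).mp hc, by omega⟩ hex
        | some shifted =>
          simp only [pvOuterA, pvLoopB, hA, hB]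
          have htemp := pv_innerA_some C w comb PySem.Set.empty temp hA
          obtain ⟨hsm, hss⟩ := pv_scanB_some C w sums hsort shifted hB
          apply ih
          · exact (PySem.Set.mem_update comb temp 0).mpr (Or.inl h0)
          · intro x
            rw [pv_mem_merge, PySem.Set.mem_update, hmem, htemp, hsm]
            constructor
            · rintro (hx | ⟨c, hc, hcx, hxC⟩)
              · exact Or.inl hx
              · exact Or.inr (Or.inr ⟨c, (hmem c).mp hc, by omega, hxC⟩)
            · rintro (hx | hx | ⟨c, hc, hcx, hxC⟩)
              · exact Or.inl hx
              · exact absurd hx (by simp [PySem.Set.empty])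
              · exact Or.inr ⟨c, (hmem c).mpr hc, by omega, hxC⟩
          · exact pv_sorted_merge sums shifted hsort hss

-- ===== VERDICT (by name: the statement is the Claim_ definition above) =====
theorem weightCapacity_spec : Claim_equal_weightCapacity := by
  intro ws C _
  unfold Spec_weightCapacity weightCapacity weightCapacity_alt
  apply pv_main
  · simp [PySem.Set.mem_ofList]
  · intro x; simp [PySem.Set.mem_ofList]
  · simp
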